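-- pv_equiv track=rewrite | github.com/russellw/QuickTextInput | QuickTextInput.py | end_sentence
-- ===== SOURCE A (Python) =====
-- def end_sentence(s):
--     for c in reversed(s):
--         if is_terminal(c):
--             return True
--         if c in ' "':
--             continue
--         return False
--     return True
--
-- def is_terminal(c):
--     return c in ".?!"
-- ===== SOURCE B (Python) =====
-- def end_sentence(s):
--     ok = True
--     for c in s:
--         if c not in ' "':
--             ok = c in ".?!"
--     return ok
-- ===== Notes on version B (the rewrite author's own statement) =====
-- stated objective: simpler
-- what changed: B is a single forward left-to-right pass with a boolean accumulator that is overwritten at every non-space/non-quote character, instead of A's reversed iteration with early returns.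
import Mathlib
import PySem

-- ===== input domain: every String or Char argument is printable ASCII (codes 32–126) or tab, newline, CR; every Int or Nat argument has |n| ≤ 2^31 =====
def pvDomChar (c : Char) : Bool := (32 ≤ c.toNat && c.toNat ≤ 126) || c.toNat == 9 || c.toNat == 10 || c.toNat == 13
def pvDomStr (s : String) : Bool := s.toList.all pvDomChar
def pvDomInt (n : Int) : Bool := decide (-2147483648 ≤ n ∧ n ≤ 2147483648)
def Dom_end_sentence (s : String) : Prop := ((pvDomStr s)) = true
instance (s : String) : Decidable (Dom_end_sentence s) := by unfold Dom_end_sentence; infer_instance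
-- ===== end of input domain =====

-- B replaces A's reversed loop with early returns by a single forward pass that
-- overwrites a boolean accumulator at every non-space/non-quote character (simpler).


-- ===== PORT A =====
-- helper: `c in ".?!"`
def is_terminal (c : Char) : Bool := c == '.' || c == '?' || c == '!'

-- `for c in reversed(s): …` as structural recursion over the reversed char list
def endLoopA : List Char → Bool
  | [] => true
  | c :: rest =>
    if is_terminal c then true
    else if c == ' ' || c == '"' then endLoopA rest
    else false

def end_sentence (s : String) : Bool := endLoopA s.toList.reverse

-- ===== PORT B =====
-- forward `for c in s` with accumulator `ok`, as a left fold over the chars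
def end_sentence_alt (s : String) : Bool :=
  s.toList.foldl
    (fun ok c => if c == ' ' || c == '"' then ok else (c == '.' || c == '?' || c == '!'))
    true

-- ===== PRECONDITION & SPEC =====
def Spec_end_sentence (s : String) (out : Bool) : Prop := out = end_sentence_alt s
instance (s : String) (out : Bool) : Decidable (Spec_end_sentence s out) := by unfold Spec_end_sentence; infer_instance

-- ===== CLAIM (what is proved, stated in full; the proofs are below) =====
def Claim_equal_end_sentence : Prop := ∀ (s : String), Dom_end_sentence s → Spec_end_sentence s (end_sentence s)

-- ===== LEMMAS AND PROOFS =====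
-- B's step function
def stepB (ok : Bool) (c : Char) : Bool :=
  if c == ' ' || c == '"' then ok else (c == '.' || c == '?' || c == '!')

-- right-to-left characterisation of B's fold: the fold over l.reverse scans l from the front
def auxB : List Char → Bool → Bool
  | [], acc => acc
  | c :: rest, acc =>
    if c == ' ' || c == '"' then auxB rest acc else (c == '.' || c == '?' || c == '!')

theorem foldl_stepB_reverse (l : List Char) (acc : Bool) :
    List.foldl stepB acc l.reverse = auxB l acc := by
  induction l generalizing acc with
  | nil => rfl
  | cons c rest ih =>
    simp only [List.reverse_cons, List.foldl_append, List.foldl_cons, List.foldl_nil, auxB, ih]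
    by_cases hs : (c == ' ' || c == '"') = true
    · simp [stepB, hs]
    · simp [stepB, hs]

theorem endLoopA_eq_auxB (l : List Char) : endLoopA l = auxB l true := by
  induction l with
  | nil => rfl
  | cons c rest ih =>
    by_cases ht : is_terminal c = true
    · have ht2 : ((c == '.' || c == '?') || c == '!') = true := ht
      have hs : (c == ' ' || c == '"') = false := by
        rcases Bool.or_eq_true_iff.mp ht2 with h | h
        · rcases Bool.or_eq_true_iff.mp h with h2 | h2 <;> simp [beq_iff_eq.mp h2]
        · simp [beq_iff_eq.mp h]
      have : (c == '.' || c == '?' || c == '!') = true := ht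
      simp [endLoopA, ht, auxB, hs, this]
    · by_cases hs : (c == ' ' || c == '"') = true
      · simp [endLoopA, ht, hs, auxB, ih]
      · have : (c == '.' || c == '?' || c == '!') = false := by simpa [is_terminal] using ht
        simp [endLoopA, ht, hs, auxB, this]

-- ===== VERDICT (by name: the statement is the Claim_ definition above) =====
theorem end_sentence_spec : Claim_equal_end_sentence := by
  intro s _
  unfold Spec_end_sentence end_sentence end_sentence_alt
  have h1 : s.toList.foldl stepB true = auxB s.toList.reverse true := by
    have := foldl_stepB_reverse s.toList.reverse true
    simpa using this
  calc endLoopA s.toList.reverse = auxB s.toList.reverse true := endLoopA_eq_auxB _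
    _ = s.toList.foldl stepB true := h1.symm
    _ = _ := rfl
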